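-- pv_equiv track=rewrite | github.com/ufukguenes/ICNN_verification | script/DHOV/MultiDHOV.py | get_current_group_indices
-- ===== SOURCE A (Python) =====
-- def get_current_group_indices(num_neurons, group_size, fixed_neurons_lower, fixed_neurons_upper):
--     group_indices = []
--     current_group = []
--     fixed_neuron_index = (fixed_neurons_lower + fixed_neurons_upper)
--     for index in range(num_neurons):
--         if index in fixed_neuron_index:
--             continue
--         else:
--             current_group.append(index)
--             if len(current_group) == group_size:
--                 group_indices.append(current_group)
--                 current_group = []
--
--     if len(current_group) > 0:
--         group_indices.append(current_group)
--     return group_indices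
-- ===== SOURCE B (Python) =====
-- def get_current_group_indices(num_neurons, group_size, fixed_neurons_lower, fixed_neurons_upper):
--     fixed = set(fixed_neurons_lower + fixed_neurons_upper)
--     free = [i for i in range(num_neurons) if i not in fixed]
--     return [free[i:i + group_size] for i in range(0, len(free), group_size)]
-- ===== Notes on version B (the rewrite author's own statement) =====
-- stated objective: simpler
-- what changed: A's interleaved accumulate-and-flush loop (append to a running group, flush when it reaches group_size, flush the remainder after the loop) is replaced by a filter pass over the range followed by fixed-stride slicing of the filtered list, with a set for the membership test.
-- outside the precondition, e.g. on get_current_group_indices(3, 0, [], []): A returns [[0, 1, 2]], B raises ValueError; on get_current_group_indices(3, -1, [], []): A returns [[0, 1, 2]], B returns []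
import Mathlib
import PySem

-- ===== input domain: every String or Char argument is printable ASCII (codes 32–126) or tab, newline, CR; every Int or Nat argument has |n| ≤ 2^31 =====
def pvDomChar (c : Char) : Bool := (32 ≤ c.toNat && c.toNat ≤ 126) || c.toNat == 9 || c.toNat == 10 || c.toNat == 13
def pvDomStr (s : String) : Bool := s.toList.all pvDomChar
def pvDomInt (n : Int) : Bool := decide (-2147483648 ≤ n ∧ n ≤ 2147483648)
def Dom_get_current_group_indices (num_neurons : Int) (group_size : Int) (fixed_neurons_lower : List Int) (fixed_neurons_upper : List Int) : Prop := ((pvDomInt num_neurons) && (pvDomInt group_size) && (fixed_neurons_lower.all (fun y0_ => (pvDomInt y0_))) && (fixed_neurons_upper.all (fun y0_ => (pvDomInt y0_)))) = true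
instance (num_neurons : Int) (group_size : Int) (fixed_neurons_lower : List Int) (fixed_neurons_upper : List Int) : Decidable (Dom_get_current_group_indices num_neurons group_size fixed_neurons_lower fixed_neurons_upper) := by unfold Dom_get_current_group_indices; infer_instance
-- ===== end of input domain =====

-- B replaces A's accumulate-and-flush loop by a filter pass followed by fixed-stride slicing (objective: simpler).

-- ===== PORT A =====
def get_current_group_indices (num_neurons : Int) (group_size : Int) (fixed_neurons_lower : List Int) (fixed_neurons_upper : List Int) : List (List Int) :=
  let fixed_neuron_index := fixed_neurons_lower ++ fixed_neurons_upper
  let s := List.foldl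
    (fun (st : List (List Int) × List Int) index =>
      if index ∈ fixed_neuron_index then st
      else
        let current_group := st.2 ++ [index]
        if (current_group.length : Int) = group_size then (st.1 ++ [current_group], ([] : List Int))
        else (st.1, current_group))
    ([], []) (PySem.List.pyRange 0 num_neurons 1)
  if s.2.length > 0 then s.1 ++ [s.2] else s.1

-- ===== PORT B =====
def get_current_group_indices_alt (num_neurons : Int) (group_size : Int) (fixed_neurons_lower : List Int) (fixed_neurons_upper : List Int) : List (List Int) :=
  let fixed := PySem.Set.ofList (fixed_neurons_lower ++ fixed_neurons_upper)
  let free := (PySem.List.pyRange 0 num_neurons 1).filter (fun i => !(PySem.Set.contains fixed i))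
  (PySem.List.pyRange 0 ((free.length : Int)) group_size).map
    (fun i => PySem.List.slice free (some i) (some (i + group_size)))

-- ===== PRECONDITION & SPEC =====
-- Pre_ restricts to the natural domain group_size ≥ 1: for group_size ≤ 0 A accidentally returns one
-- unbounded group, while B's range-step slicing raises ValueError (step 0) or yields no groups (negative step).
def Pre_get_current_group_indices (num_neurons : Int) (group_size : Int) (fixed_neurons_lower : List Int) (fixed_neurons_upper : List Int) : Prop := 1 ≤ group_size
instance (num_neurons : Int) (group_size : Int) (fixed_neurons_lower : List Int) (fixed_neurons_upper : List Int) : Decidable (Pre_get_current_group_indices num_neurons group_size fixed_neurons_lower fixed_neurons_upper) := by unfold Pre_get_current_group_indices; infer_instance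
def pvWitness_get_current_group_indices : Int × Int × List Int × List Int := (5, 2, [1], [3])

def Spec_get_current_group_indices (num_neurons : Int) (group_size : Int) (fixed_neurons_lower : List Int) (fixed_neurons_upper : List Int) (out : List (List Int)) : Prop := out = get_current_group_indices_alt num_neurons group_size fixed_neurons_lower fixed_neurons_upper
instance (num_neurons : Int) (group_size : Int) (fixed_neurons_lower : List Int) (fixed_neurons_upper : List Int) (out : List (List Int)) : Decidable (Spec_get_current_group_indices num_neurons group_size fixed_neurons_lower fixed_neurons_upper out) := by unfold Spec_get_current_group_indices; infer_instance

-- ===== CLAIM (what is proved, stated in full; the proofs are below) =====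
def Claim_equal_get_current_group_indices : Prop := ∀ (num_neurons : Int) (group_size : Int) (fixed_neurons_lower : List Int) (fixed_neurons_upper : List Int), Dom_get_current_group_indices num_neurons group_size fixed_neurons_lower fixed_neurons_upper → Pre_get_current_group_indices num_neurons group_size fixed_neurons_lower fixed_neurons_upper → Spec_get_current_group_indices num_neurons group_size fixed_neurons_lower fixed_neurons_upper (get_current_group_indices num_neurons group_size fixed_neurons_lower fixed_neurons_upper)

-- ===== LEMMAS AND PROOFS =====

-- the canonical chunking both programs compute: consecutive G-blocks, last one possibly shorter
def chunksOf (G : Nat) : List Int → List (List Int)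
  | [] => []
  | x :: xs => (x :: xs.take (G - 1)) :: chunksOf G (xs.drop (G - 1))
  termination_by l => l.length
  decreasing_by simp only [List.length_drop, List.length_cons]; omega

theorem chunksOf_nil_eq (G : Nat) : chunksOf G [] = [] := by rw [chunksOf.eq_def]

theorem chunksOf_cons_eq (G : Nat) (x : Int) (xs : List Int) :
    chunksOf G (x :: xs) = (x :: xs.take (G - 1)) :: chunksOf G (xs.drop (G - 1)) := by
  rw [chunksOf.eq_def]

theorem chunksOf_take_drop (G : Nat) (hG : 1 ≤ G) (x : Int) (xs : List Int) :
    chunksOf G (x :: xs) = (x :: xs).take G :: chunksOf G ((x :: xs).drop G) := by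
  obtain ⟨G', rfl⟩ : ∃ G', G = G' + 1 := ⟨G - 1, by omega⟩
  rw [chunksOf_cons_eq]
  simp [List.take_succ_cons, List.drop_succ_cons]

theorem chunksOf_small (G : Nat) (c : List Int) (hne : c ≠ []) (hc : c.length ≤ G) :
    chunksOf G c = [c] := by
  cases c with
  | nil => exact absurd rfl hne
  | cons x xs =>
    simp only [List.length_cons] at hc
    rw [chunksOf_cons_eq, List.take_of_length_le (by omega), List.drop_eq_nil_of_le (by omega),
      chunksOf_nil_eq]

theorem chunksOf_full (G : Nat) (hG : 1 ≤ G) (c r : List Int) (hc : c.length = G) :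
    chunksOf G (c ++ r) = c :: chunksOf G r := by
  cases c with
  | nil => simp at hc; omega
  | cons x xs =>
    simp only [List.length_cons] at hc
    have hx : G - 1 = xs.length := by omega
    rw [List.cons_append, chunksOf_cons_eq, hx, List.take_left, List.drop_left]

-- A's loop, named: the per-index step and the final flush
def stepAFull (g : Int) (fix : List Int) (st : List (List Int) × List Int) (index : Int) :
    List (List Int) × List Int :=
  if index ∈ fix then st
  else
    if ((st.2 ++ [index]).length : Int) = g then (st.1 ++ [st.2 ++ [index]], [])
    else (st.1, st.2 ++ [index])

def finishA (s : List (List Int) × List Int) : List (List Int) :=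
  if s.2.length > 0 then s.1 ++ [s.2] else s.1

-- A's loop (with the skip of fixed indices inlined) computes chunksOf of the filtered list
theorem foldA (g : Int) (G : Nat) (hg : (G : Int) = g) (hG : 1 ≤ G) (fix : List Int) :
    ∀ (l : List Int) (acc : List (List Int)) (cur : List Int), cur.length < G →
      finishA (List.foldl (stepAFull g fix) (acc, cur) l)
        = acc ++ chunksOf G (cur ++ l.filter (fun i => !(decide (i ∈ fix)))) := by
  intro l
  induction l with
  | nil =>
    intro acc cur hcur
    simp only [List.foldl_nil, List.filter_nil, List.append_nil]
    by_cases hc : cur = []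
    · subst hc; simp [finishA, chunksOf_nil_eq]
    · rw [chunksOf_small G cur hc (by omega)]
      cases cur with
      | nil => exact absurd rfl hc
      | cons a t => simp [finishA]
  | cons i l' ih =>
    intro acc cur hcur
    simp only [List.foldl_cons, List.filter_cons]
    by_cases hi : i ∈ fix
    · have hpi : (!(decide (i ∈ fix))) = false := by simp [hi]
      rw [hpi, if_neg Bool.false_ne_true,
        show stepAFull g fix (acc, cur) i = (acc, cur) from by simp [stepAFull, hi]]
      exact ih acc cur hcur
    · have hpi : (!(decide (i ∈ fix))) = true := by simp [hi]
      rw [hpi, if_pos rfl]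
      by_cases hfull : cur.length + 1 = G
      · have hlen : (cur ++ [i]).length = G := by simp; omega
        have hcond : ((cur ++ [i]).length : Int) = g := by rw [hlen]; exact hg
        rw [show stepAFull g fix (acc, cur) i = (acc ++ [cur ++ [i]], ([] : List Int)) from by
              simp only [stepAFull, if_neg hi, if_pos hcond]]
        rw [ih (acc ++ [cur ++ [i]]) [] (by simp only [List.length_nil]; omega)]
        rw [show cur ++ i :: l'.filter (fun j => !(decide (j ∈ fix)))
              = (cur ++ [i]) ++ l'.filter (fun j => !(decide (j ∈ fix))) from by simp]
        rw [chunksOf_full G hG (cur ++ [i]) _ hlen]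
        simp
      · have hcond : ¬ ((cur ++ [i]).length : Int) = g := by
          rw [← hg]
          intro h
          have h' : (cur ++ [i]).length = G := by exact_mod_cast h
          simp only [List.length_append, List.length_cons, List.length_nil] at h'
          omega
        rw [show stepAFull g fix (acc, cur) i = (acc, cur ++ [i]) from by
              simp only [stepAFull, if_neg hi, if_neg hcond]]
        rw [ih acc (cur ++ [i]) (by simp; omega)]
        simp

-- range lemmas for a general positive step
theorem pyRange_pos_nil {a b s : Int} (hs : 0 < s) (hba : b ≤ a) :
    PySem.List.pyRange a b s = [] := by
  rw [PySem.List.pyRange_of_pos _ _ hs, if_neg (by omega)]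
  simp

theorem pyRange_pos_cons {a b s : Int} (hs : 0 < s) (hab : a < b) :
    PySem.List.pyRange a b s = a :: PySem.List.pyRange (a + s) b s := by
  rw [PySem.List.pyRange_of_pos _ _ hs, PySem.List.pyRange_of_pos _ _ hs, if_pos hab]
  have hq0 : 0 ≤ (b - a - 1) / s := Int.ediv_nonneg (by omega) (by omega)
  have e : b - a + s - 1 = b - a - 1 + 1 * s := by ring
  have hcount : (b - a + s - 1) / s = (b - a - 1) / s + 1 := by
    rw [e, Int.add_mul_ediv_right _ _ (by omega : s ≠ 0)]
  by_cases h2 : a + s < b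
  · rw [if_pos h2]
    have e2 : b - (a + s) + s - 1 = b - a - 1 := by ring
    have ht : ((b - a + s - 1) / s).toNat = ((b - (a + s) + s - 1) / s).toNat + 1 := by
      rw [e2, hcount]; omega
    rw [ht, List.range_succ_eq_map, List.map_cons, List.map_map]
    congr 1
    · simp
    · apply List.map_congr_left
      intro k _
      simp only [Function.comp_apply]
      push_cast
      ring
  · rw [if_neg h2]
    have h0 : (b - a - 1) / s = 0 := Int.ediv_eq_zero_of_lt (by omega) (by omega)
    have ht : ((b - a + s - 1) / s).toNat = 1 := by rw [hcount, h0]; norm_num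
    rw [ht]
    simp

theorem pyRange_pos_shift {a b s : Int} (hs : 0 < s) :
    PySem.List.pyRange (a + s) b s = (PySem.List.pyRange a (b - s) s).map (· + s) := by
  rw [PySem.List.pyRange_of_pos _ _ hs, PySem.List.pyRange_of_pos _ _ hs, List.map_map]
  have e : b - (a + s) + s - 1 = b - s - a + s - 1 := by ring
  have hc : (a + s < b) ↔ (a < b - s) := by omega
  rw [e, if_congr hc rfl rfl]
  apply List.map_congr_left
  intro k _
  simp only [Function.comp_apply]
  ring

-- B's strided slicing computes chunksOf
theorem sliceChunks (G : Nat) (hG : 1 ≤ G) (l : List Int) :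
    (PySem.List.pyRange 0 ((l.length : Int)) (G : Int)).map
      (fun i => PySem.List.slice l (some i) (some (i + (G : Int)))) = chunksOf G l := by
  have hs : (0 : Int) < (G : Int) := by omega
  match l with
  | [] =>
    rw [pyRange_pos_nil hs (by simp)]
    simp [chunksOf_nil_eq]
  | x :: xs =>
    have hlen : (0 : Int) < (((x :: xs).length : Int)) := by
      simp only [List.length_cons]; omega
    rw [pyRange_pos_cons hs hlen, List.map_cons, pyRange_pos_shift hs, List.map_map]
    have hhead : PySem.List.slice (x :: xs) (some 0) (some (0 + (G : Int))) = (x :: xs).take G := by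
      rw [PySem.List.slice_toNat _ (le_refl 0) (by omega)]
      simp
    rw [hhead, chunksOf_take_drop G hG x xs]
    congr 1
    by_cases hle : G ≤ (x :: xs).length
    · have he : ((((x :: xs).drop G).length : Int)) = ((x :: xs).length : Int) - (G : Int) := by
        simp only [List.length_drop]; omega
      rw [← he, ← sliceChunks G hG ((x :: xs).drop G)]
      apply List.map_congr_left
      intro i hi
      have h0i : 0 ≤ i := ((PySem.List.mem_pyRange_iff_of_pos hs i).mp hi).1
      simp only [Function.comp_apply]
      rw [PySem.List.slice_toNat _ (by omega) (by omega),
          PySem.List.slice_toNat _ (by omega) (by omega), List.drop_drop]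
      have h1 : (i + (G : Int)).toNat = G + i.toNat := by omega
      rw [h1]
      congr 1
      omega
    · have hd : (x :: xs).drop G = [] := List.drop_eq_nil_of_le (by omega)
      have hn : PySem.List.pyRange 0 (((x :: xs).length : Int) - (G : Int)) (G : Int) = [] :=
        pyRange_pos_nil hs (by omega)
      rw [hn, hd]
      simp [chunksOf_nil_eq]
  termination_by l.length
  decreasing_by simp only [List.length_drop, List.length_cons]; omega

-- ===== VERDICT (by name: the statement is the Claim_ definition above) =====
theorem get_current_group_indices_spec : Claim_equal_get_current_group_indices := by
  intro n g fl fu _hdom hpre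
  have hg1 : (1 : Int) ≤ g := hpre
  have hG1 : 1 ≤ g.toNat := by omega
  have hg : ((g.toNat : Int)) = g := Int.toNat_of_nonneg (by omega)
  unfold Spec_get_current_group_indices
  have hA : get_current_group_indices n g fl fu
      = finishA (List.foldl (stepAFull g (fl ++ fu)) ([], []) (PySem.List.pyRange 0 n 1)) := rfl
  rw [hA, foldA g g.toNat hg hG1 (fl ++ fu) (PySem.List.pyRange 0 n 1) [] [] (by simp only [List.length_nil]; omega)]
  simp only [List.nil_append]
  have hfilt : (PySem.List.pyRange 0 n 1).filter
        (fun i => !(PySem.Set.contains (PySem.Set.ofList (fl ++ fu)) i))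
      = (PySem.List.pyRange 0 n 1).filter (fun i => !(decide (i ∈ fl ++ fu))) := by
    apply List.filter_congr
    intro x _
    by_cases h : x ∈ fl ++ fu
    · have hc : PySem.Set.contains (PySem.Set.ofList (fl ++ fu)) x = true :=
        (PySem.Set.contains_iff _ _).mpr ((PySem.Set.mem_ofList _ _).mpr h)
      simp [h]
    · have hc : PySem.Set.contains (PySem.Set.ofList (fl ++ fu)) x = false := by
        rw [← Bool.not_eq_true]
        intro hcc
        exact h ((PySem.Set.mem_ofList _ _).mp ((PySem.Set.contains_iff _ _).mp hcc))
      simp [h]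
  simp only [get_current_group_indices_alt]
  rw [hfilt, ← hg]
  exact (sliceChunks g.toNat hG1 _).symm
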